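-- pv_equiv track=rewrite | github.com/AlbertoCastelo/Neuro-Evolution-BNN | neat/evolution_operators/mutation.py | adds_multihop_jump
-- ===== SOURCE A (Python) =====
-- import copy
--
-- def adds_multihop_jump(connections: list, output_node_keys, input_node_keys) -> bool:
--     layer_counter = 0
--     layers = {0: output_node_keys}
--
--     nodes = []
--     layer_output_node_keys = copy.deepcopy(output_node_keys)
--     is_not_done = True
--     while is_not_done:
--
--         nodes_in_previous_layer_set = set()
--         for connection in connections:
--             input_node = connection[0]
--             output_node = connection[1]
--             if output_node in layer_output_node_keys:
--                 if input_node in nodes: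
--                     return True
--                 nodes_in_previous_layer_set = nodes_in_previous_layer_set.union({input_node})
--         nodes += list(nodes_in_previous_layer_set)
--
--         # keep
--         if len(nodes_in_previous_layer_set) == 0:
--             is_not_done = False
--         else:
--             layer_counter += 1
--             layers[layer_counter] = nodes_in_previous_layer_set
--             layer_output_node_keys = nodes_in_previous_layer_set
--
--     return False
-- ===== SOURCE B (Python) =====
-- def adds_multihop_jump(connections: list, output_node_keys, input_node_keys) -> bool:
--     # Precompute reverse adjacency once, then do a single layered backward BFS:
--     # each layer is reached via dictionary lookups instead of a full rescan of connections.
--     preds = {}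
--     for input_node, output_node in connections:
--         preds.setdefault(output_node, set()).add(input_node)
--     frontier = set(output_node_keys)
--     visited = set()
--     while True:
--         nxt = set()
--         for node in frontier:
--             nxt |= preds.get(node, set())
--         if not nxt:
--             return False
--         if not nxt.isdisjoint(visited):
--             return True
--         visited |= nxt
--         frontier = nxt
-- ===== Notes on version B (the rewrite author's own statement) =====
-- stated objective: faster
-- what changed: Instead of rescanning the whole connection list once per layer, B builds a reverse-adjacency dictionary (output -> set of inputs) once and then runs a layered backward BFS over set frontiers, detecting a revisited node via a set-disjointness test.
import Mathlib
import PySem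

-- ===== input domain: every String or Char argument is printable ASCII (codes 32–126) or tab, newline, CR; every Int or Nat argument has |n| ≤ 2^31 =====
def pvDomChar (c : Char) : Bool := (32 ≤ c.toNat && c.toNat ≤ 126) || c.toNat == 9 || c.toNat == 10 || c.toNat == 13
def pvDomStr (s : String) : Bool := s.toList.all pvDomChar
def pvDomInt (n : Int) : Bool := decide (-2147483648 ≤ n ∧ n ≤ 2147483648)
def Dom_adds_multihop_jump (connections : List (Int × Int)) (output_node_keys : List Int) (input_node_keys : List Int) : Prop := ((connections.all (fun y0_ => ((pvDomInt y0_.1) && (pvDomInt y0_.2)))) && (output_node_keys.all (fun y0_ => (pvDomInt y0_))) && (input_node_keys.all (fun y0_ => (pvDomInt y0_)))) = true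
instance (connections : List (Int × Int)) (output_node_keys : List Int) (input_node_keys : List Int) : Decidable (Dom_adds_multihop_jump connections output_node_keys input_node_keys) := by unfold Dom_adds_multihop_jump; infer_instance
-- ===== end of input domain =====

-- B replaces A's per-layer full rescan of the connection list by a reverse-adjacency
-- dictionary built once plus a layered backward BFS (objective: faster).

-- ===== PORT A =====
-- Inner 'for connection in connections' loop of one while-iteration: returns none on the
-- early 'return True' (input_node in nodes), otherwise the built set of previous-layer nodes.
-- 'nodes' is a Python list consumed only by membership, modelled as the list it is.
def pvAScan (nodes : List Int) (layerOut : List Int) :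
    List (Int × Int) → PySem.Set Int → Option (PySem.Set Int)
  | [], acc => some acc
  | c :: rest, acc =>
    if c.2 ∈ layerOut then
      if c.1 ∈ nodes then none
      else pvAScan nodes layerOut rest (PySem.Set.add acc c.1)
    else pvAScan nodes layerOut rest acc

-- The while-loop. Fuel: every iteration that continues adds at least one node (all fresh,
-- all drawn from the inputs of connections, kept distinct), so the Python loop runs at most
-- connections.length + 1 times; fuel 0 is never reached with that fuel.
def pvALoop (connections : List (Int × Int)) : Nat → List Int → List Int → Bool
  | 0, _, _ => false
  | fuel + 1, nodes, layerOut =>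
    match pvAScan nodes layerOut connections PySem.Set.empty with
    | none => true                                    -- return True
    | some s =>
      if s.length = 0 then false                      -- is_not_done = False; return False
      else pvALoop connections fuel (nodes ++ s) s    -- nodes += list(s); next layer = s

def adds_multihop_jump (connections : List (Int × Int)) (output_node_keys : List Int) (input_node_keys : List Int) : Bool :=
  pvALoop connections (connections.length + 1) [] output_node_keys

-- ===== PORT B =====
-- preds.setdefault(output_node, set()).add(input_node)
def pvPreds (connections : List (Int × Int)) : PySem.Dict Int (PySem.Set Int) :=
  connections.foldl
    (fun d c => d.insert c.2 (PySem.Set.add (d.getD c.2 PySem.Set.empty) c.1))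
    PySem.Dict.empty

-- The while True loop; same fuel bound as A's loop (visited grows by ≥ 1 fresh input per
-- continuing iteration, so at most connections.length + 1 iterations happen).
def pvBLoop (preds : PySem.Dict Int (PySem.Set Int)) : Nat → PySem.Set Int → PySem.Set Int → Bool
  | 0, _, _ => false
  | fuel + 1, frontier, visited =>
    let nxt := frontier.foldl (fun acc node => PySem.Set.union acc (preds.getD node PySem.Set.empty)) PySem.Set.empty
    if nxt.length = 0 then false                         -- if not nxt: return False
    else if !(PySem.Set.isdisjoint nxt visited) then true -- if not nxt.isdisjoint(visited): return True
    else pvBLoop preds fuel nxt (PySem.Set.union visited nxt)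

def adds_multihop_jump_alt (connections : List (Int × Int)) (output_node_keys : List Int) (input_node_keys : List Int) : Bool :=
  pvBLoop (pvPreds connections) (connections.length + 1) (PySem.Set.ofList output_node_keys) PySem.Set.empty

-- ===== PRECONDITION & SPEC =====
def Spec_adds_multihop_jump (connections : List (Int × Int)) (output_node_keys : List Int) (input_node_keys : List Int) (out : Bool) : Prop := out = adds_multihop_jump_alt connections output_node_keys input_node_keys
instance (connections : List (Int × Int)) (output_node_keys : List Int) (input_node_keys : List Int) (out : Bool) : Decidable (Spec_adds_multihop_jump connections output_node_keys input_node_keys out) := by unfold Spec_adds_multihop_jump; infer_instance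

-- ===== CLAIM (what is proved, stated in full; the proofs are below) =====
def Claim_equal_adds_multihop_jump : Prop := ∀ (connections : List (Int × Int)) (output_node_keys : List Int) (input_node_keys : List Int), Dom_adds_multihop_jump connections output_node_keys input_node_keys → Spec_adds_multihop_jump connections output_node_keys input_node_keys (adds_multihop_jump connections output_node_keys input_node_keys)

-- ===== LEMMAS AND PROOFS =====

-- The reverse-adjacency dict looks up exactly the connection list.
theorem mem_getD_pvPreds_foldl (l : List (Int × Int)) (d : PySem.Dict Int (PySem.Set Int)) (i o : Int) :
    i ∈ (l.foldl (fun d c => d.insert c.2 (PySem.Set.add (d.getD c.2 PySem.Set.empty) c.1)) d).getD o PySem.Set.empty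
      ↔ (i, o) ∈ l ∨ i ∈ d.getD o PySem.Set.empty := by
  induction l generalizing d with
  | nil => simp
  | cons c rest ih =>
    simp only [List.foldl_cons, ih, List.mem_cons]
    rw [PySem.Dict.getD_insert]
    by_cases h : o = c.2
    · subst h
      simp [PySem.Set.mem_add, Prod.ext_iff]
      tauto
    · simp only [if_neg h]
      constructor
      · rintro (hl | hr)
        · exact Or.inl (Or.inr hl)
        · exact Or.inr hr
      · rintro ((he | hl) | hr)
        · exact absurd (congrArg Prod.snd he) (by simpa using h)
        · exact Or.inl hl
        · exact Or.inr hr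

theorem mem_getD_pvPreds (connections : List (Int × Int)) (i o : Int) :
    i ∈ (pvPreds connections).getD o PySem.Set.empty ↔ (i, o) ∈ connections := by
  rw [pvPreds, mem_getD_pvPreds_foldl]
  simp [PySem.Dict.getD_empty, PySem.Set.empty]

-- Characterisation of A's inner scan.
theorem pvAScan_eq_none_iff (nodes layerOut : List Int) (l : List (Int × Int)) (acc : PySem.Set Int) :
    pvAScan nodes layerOut l acc = none ↔ ∃ c ∈ l, c.2 ∈ layerOut ∧ c.1 ∈ nodes := by
  induction l generalizing acc with
  | nil => simp [pvAScan]
  | cons c rest ih =>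
    simp only [pvAScan]
    split_ifs with h1 h2
    · simp [h1, h2]
    · rw [ih]
      simp only [List.mem_cons]
      constructor
      · rintro ⟨d, hd, hdl, hdn⟩
        exact ⟨d, Or.inr hd, hdl, hdn⟩
      · rintro ⟨d, (rfl | hd), hdl, hdn⟩
        · exact absurd hdn h2
        · exact ⟨d, hd, hdl, hdn⟩
    · rw [ih]
      simp only [List.mem_cons]
      constructor
      · rintro ⟨d, hd, hdl, hdn⟩
        exact ⟨d, Or.inr hd, hdl, hdn⟩
      · rintro ⟨d, (rfl | hd), hdl, hdn⟩
        · exact absurd hdl h1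
        · exact ⟨d, hd, hdl, hdn⟩

theorem mem_pvAScan_some (nodes layerOut : List Int) (l : List (Int × Int)) (acc s : PySem.Set Int)
    (h : pvAScan nodes layerOut l acc = some s) (x : Int) :
    x ∈ s ↔ x ∈ acc ∨ ∃ c ∈ l, c.2 ∈ layerOut ∧ c.1 = x := by
  induction l generalizing acc with
  | nil =>
    simp only [pvAScan, Option.some.injEq] at h
    subst h; simp
  | cons c rest ih =>
    simp only [pvAScan] at h
    split_ifs at h with h1 h2
    · rw [ih _ h]
      simp only [PySem.Set.mem_add, List.mem_cons]
      constructor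
      · rintro ((ha | rfl) | ⟨d, hd, hdl, hdx⟩)
        · exact Or.inl ha
        · exact Or.inr ⟨c, Or.inl rfl, h1, rfl⟩
        · exact Or.inr ⟨d, Or.inr hd, hdl, hdx⟩
      · rintro (ha | ⟨d, (rfl | hd), hdl, hdx⟩)
        · exact Or.inl (Or.inl ha)
        · exact Or.inl (Or.inr hdx.symm)
        · exact Or.inr ⟨d, hd, hdl, hdx⟩
    · rw [ih _ h]
      simp only [List.mem_cons]
      constructor
      · rintro (ha | ⟨d, hd, hdl, hdx⟩)
        · exact Or.inl ha
        · exact Or.inr ⟨d, Or.inr hd, hdl, hdx⟩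
      · rintro (ha | ⟨d, (rfl | hd), hdl, hdx⟩)
        · exact Or.inl ha
        · exact absurd hdl h1
        · exact Or.inr ⟨d, hd, hdl, hdx⟩

-- Membership in B's per-layer union fold.
theorem mem_pvBFold (preds : PySem.Dict Int (PySem.Set Int)) (frontier : List Int) (acc : PySem.Set Int) (x : Int) :
    x ∈ frontier.foldl (fun acc node => PySem.Set.union acc (preds.getD node PySem.Set.empty)) acc
      ↔ x ∈ acc ∨ ∃ node ∈ frontier, x ∈ preds.getD node PySem.Set.empty := by
  induction frontier generalizing acc with
  | nil => simp
  | cons n rest ih =>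
    simp only [List.foldl_cons, ih, PySem.Set.mem_union, List.mem_cons]
    constructor
    · rintro ((ha | hn) | ⟨d, hd, hx⟩)
      · exact Or.inl ha
      · exact Or.inr ⟨n, Or.inl rfl, hn⟩
      · exact Or.inr ⟨d, Or.inr hd, hx⟩
    · rintro (ha | ⟨d, (rfl | hd), hx⟩)
      · exact Or.inl (Or.inl ha)
      · exact Or.inl (Or.inr hx)
      · exact Or.inr ⟨d, hd, hx⟩

-- A list with no members is empty.
theorem length_zero_of_no_mem {α : Type} (s : List α) (h : ∀ x, x ∉ s) : s.length = 0 := by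
  cases s with
  | nil => rfl
  | cons a t => exact absurd (List.mem_cons_self) (h a)

-- Main loop correspondence: states equal as sets ⇒ equal results, at the same fuel.
theorem pvLoop_eq (connections : List (Int × Int)) (fuel : Nat) :
    ∀ (nodes layerOut : List Int) (frontier visited : PySem.Set Int),
      (∀ x, x ∈ nodes ↔ x ∈ visited) → (∀ x, x ∈ layerOut ↔ x ∈ frontier) →
      pvALoop connections fuel nodes layerOut = pvBLoop (pvPreds connections) fuel frontier visited := by
  induction fuel with
  | zero => intro _ _ _ _ _ _; rfl
  | succ fuel ih =>
    intro nodes layerOut frontier visited hnv hlf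
    simp only [pvALoop, pvBLoop]
    have hnxt : ∀ x, x ∈ frontier.foldl (fun acc node => PySem.Set.union acc ((pvPreds connections).getD node PySem.Set.empty)) PySem.Set.empty
        ↔ ∃ c ∈ connections, c.2 ∈ layerOut ∧ c.1 = x := by
      intro x
      rw [mem_pvBFold]
      constructor
      · rintro (h | ⟨node, hn, hc⟩)
        · exact absurd h (by simp [PySem.Set.empty])
        · exact ⟨(x, node), (mem_getD_pvPreds connections x node).mp hc, (hlf node).mpr hn, rfl⟩
      · rintro ⟨⟨ci, co⟩, hc, hcl, rfl⟩
        exact Or.inr ⟨co, (hlf co).mp hcl, (mem_getD_pvPreds connections ci co).mpr hc⟩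
    cases hscan : pvAScan nodes layerOut connections PySem.Set.empty with
    | none =>
      rw [pvAScan_eq_none_iff] at hscan
      obtain ⟨c, hc, hcl, hcn⟩ := hscan
      have hx : c.1 ∈ frontier.foldl (fun acc node => PySem.Set.union acc ((pvPreds connections).getD node PySem.Set.empty)) PySem.Set.empty :=
        (hnxt c.1).mpr ⟨c, hc, hcl, rfl⟩
      have hne : ¬ (frontier.foldl (fun acc node => PySem.Set.union acc ((pvPreds connections).getD node PySem.Set.empty)) PySem.Set.empty).length = 0 := by
        intro h0
        rw [List.length_eq_zero_iff] at h0
        rw [h0] at hx; exact absurd hx (List.not_mem_nil)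
      have hdisj : PySem.Set.isdisjoint (frontier.foldl (fun acc node => PySem.Set.union acc ((pvPreds connections).getD node PySem.Set.empty)) PySem.Set.empty) visited = false := by
        rw [← Bool.not_eq_true, PySem.Set.isdisjoint_iff]
        intro hdj
        exact hdj c.1 hx ((hnv c.1).mp hcn)
      rw [if_neg hne, hdisj]
      rfl
    | some s =>
      have hno : ¬ ∃ c ∈ connections, c.2 ∈ layerOut ∧ c.1 ∈ nodes := by
        intro hcontra
        rw [← pvAScan_eq_none_iff nodes layerOut connections PySem.Set.empty, hscan] at hcontra
        simp at hcontra
      have hmem : ∀ x, x ∈ s ↔ ∃ c ∈ connections, c.2 ∈ layerOut ∧ c.1 = x := by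
        intro x
        rw [mem_pvAScan_some nodes layerOut connections PySem.Set.empty s hscan x]
        simp [PySem.Set.empty]
      by_cases hz : s.length = 0
      · have hzb : (frontier.foldl (fun acc node => PySem.Set.union acc ((pvPreds connections).getD node PySem.Set.empty)) PySem.Set.empty).length = 0 := by
          apply length_zero_of_no_mem
          intro x hx
          rw [List.length_eq_zero_iff] at hz
          have := (hmem x).mpr ((hnxt x).mp hx)
          rw [hz] at this; exact absurd this (List.not_mem_nil)
        rw [if_pos hzb]
        dsimp only
        rw [if_pos hz]
      · obtain ⟨x0, hx0⟩ := List.exists_mem_of_ne_nil s (by intro h; exact hz (by rw [h]; rfl))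
        have hnzb : ¬ (frontier.foldl (fun acc node => PySem.Set.union acc ((pvPreds connections).getD node PySem.Set.empty)) PySem.Set.empty).length = 0 := by
          intro h0
          rw [List.length_eq_zero_iff] at h0
          have := (hnxt x0).mpr ((hmem x0).mp hx0)
          rw [h0] at this; exact absurd this (List.not_mem_nil)
        have hdisj : PySem.Set.isdisjoint (frontier.foldl (fun acc node => PySem.Set.union acc ((pvPreds connections).getD node PySem.Set.empty)) PySem.Set.empty) visited = true := by
          rw [PySem.Set.isdisjoint_iff]
          intro x hx hxv
          obtain ⟨c, hc, hcl, hcx⟩ := (hnxt x).mp hx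
          exact hno ⟨c, hc, hcl, by rw [hcx]; exact (hnv x).mpr hxv⟩
        rw [if_neg hnzb, hdisj]
        dsimp only
        rw [if_neg hz, Bool.not_true, if_neg (by simp : ¬ (false = true))]
        apply ih
        · intro x
          simp only [List.mem_append, PySem.Set.mem_union, hnv x, hmem x, hnxt x]
        · intro x
          rw [hmem x, hnxt x]

-- ===== VERDICT (by name: the statement is the Claim_ definition above) =====
theorem adds_multihop_jump_spec : Claim_equal_adds_multihop_jump := by
  intro connections output_node_keys input_node_keys _
  unfold Spec_adds_multihop_jump adds_multihop_jump adds_multihop_jump_alt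
  apply pvLoop_eq
  · intro x; simp [PySem.Set.empty]
  · intro x; rw [PySem.Set.mem_ofList]
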